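-- pv_equiv track=rewrite | github.com/coscristian/CompetitiveProgramming | Codeforces/Contests/EAFIT/loveA.py | love_A
-- ===== SOURCE A (Python) =====
-- import math
--
-- def countAes(string: str):
--     count = 0
--     for i in string:
--         if i == "a":
--             count += 1
--     return count
--
-- def love_A(orig: str):
--     s = orig
--     flag = False
--     pos = 0
--     amount_aes = countAes(orig)
--     while amount_aes <= math.ceil(len(s)/2):
--         flag = True
--         s = list(s)
--         s.remove(orig[pos])
--         s = "".join(s)
--         pos += 1
--     if flag:
--         return len(s) + 1
--     return len(s)
-- ===== SOURCE B (Python) =====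
-- def love_A(orig: str):
--     # O(n): count the 'a's once; closed form for the final length.
--     a = orig.count("a")
--     n = len(orig)
--     return n if n <= 2 * a - 2 else 2 * a - 1
-- ===== Notes on version B (the rewrite author's own statement) =====
-- stated objective: faster
-- what changed: replaces the quadratic remove-one-character-at-a-time while-loop by a single count of the letter a and a closed-form answer (n if n <= 2a-2 else 2a-1)
import Mathlib
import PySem

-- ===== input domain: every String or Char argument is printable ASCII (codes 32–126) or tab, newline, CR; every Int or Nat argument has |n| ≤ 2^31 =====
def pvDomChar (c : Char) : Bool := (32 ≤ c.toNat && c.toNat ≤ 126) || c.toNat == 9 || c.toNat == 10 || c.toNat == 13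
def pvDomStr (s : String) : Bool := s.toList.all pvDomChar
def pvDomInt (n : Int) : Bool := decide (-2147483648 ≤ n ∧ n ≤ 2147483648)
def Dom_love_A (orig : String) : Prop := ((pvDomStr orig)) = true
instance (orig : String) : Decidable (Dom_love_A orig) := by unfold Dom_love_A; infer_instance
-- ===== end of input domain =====

-- B replaces A's quadratic character-removal loop by one count of the letter a and a closed-form answer (faster).

-- ===== PORT A =====
-- helper countAes: the counting for-loop of A
def countAes (string : String) : Int :=
  string.toList.foldl (fun count i => if i == 'a' then count + 1 else count) 0

-- used by the port's decreasing_by: a successful list.remove shortens the list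
theorem pvRemoveLen {α : Type} [BEq α] [LawfulBEq α] {xs r : List α} {v : α}
    (h : PySem.List.remove? xs v = some r) : r.length < xs.length := by
  have hv : v ∈ xs := by
    by_contra hv
    rw [(PySem.List.remove?_eq_none_iff xs v).2 hv] at h
    simp at h
  rw [PySem.List.remove?_eq_some_erase xs v hv] at h
  cases h
  rw [List.length_erase_of_mem hv]
  exact Nat.sub_lt (List.length_pos_of_mem hv) Nat.one_pos

-- the while-loop of A; state = (s, pos, flag); amount_aes never changes inside the loop.
-- math.ceil(len(s)/2) is ported as Nat (len+1)/2, exact for all nonnegative lengths here.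
def loveLoop (origL : List Char) (amount : Int) (s : List Char) (pos : Nat) (flag : Bool) : Int :=
  if amount ≤ (((s.length + 1) / 2 : Nat) : Int) then
    match PySem.List.pyGet? origL (pos : Int) with
    | none => 0   -- Python raises IndexError here (orig[pos] out of range); excluded by Pre_love_A
    | some c =>
      match h2 : PySem.List.remove? s c with
      | none => 0   -- Python raises ValueError here; never reached from love_A's initial state
      | some s' => loveLoop origL amount s' (pos + 1) true
  else if flag then (s.length : Int) + 1 else (s.length : Int)
termination_by s.length
decreasing_by exact pvRemoveLen h2

def love_A (orig : String) : Int :=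
  loveLoop orig.toList (countAes orig) orig.toList 0 false

-- ===== PORT B =====
def love_A_alt (orig : String) : Int :=
  let a : Int := (PySem.Str.count orig "a" : Int)
  let n : Int := PySem.Str.len orig
  if n ≤ 2 * a - 2 then n else 2 * a - 1

-- ===== PRECONDITION & SPEC =====
-- Pre_ excludes exactly the strings without the letter a: there A's loop empties s and then raises IndexError.
def Pre_love_A (orig : String) : Prop := 'a' ∈ orig.toList
instance (orig : String) : Decidable (Pre_love_A orig) := by unfold Pre_love_A; infer_instance
def pvWitness_love_A : String := "ba"

def Spec_love_A (orig : String) (out : Int) : Prop := out = love_A_alt orig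
instance (orig : String) (out : Int) : Decidable (Spec_love_A orig out) := by unfold Spec_love_A; infer_instance

-- ===== CLAIM (what is proved, stated in full; the proofs are below) =====
def Claim_equal_love_A : Prop := ∀ (orig : String), Dom_love_A orig → Pre_love_A orig → Spec_love_A orig (love_A orig)

-- ===== LEMMAS AND PROOFS =====

-- PySem.Chars.count for a single-character needle is List.count
theorem pvCountGoSingle (c : Char) (l : List Char) (fuel acc : Nat) (h : l.length ≤ fuel) :
    PySem.Chars.count.go [c] fuel l acc = acc + l.count c := by
  induction l generalizing fuel acc with
  | nil => cases fuel <;> simp [PySem.Chars.count.go]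
  | cons x t ih =>
    cases fuel with
    | zero => simp at h
    | succ f =>
      simp only [List.length_cons, Nat.add_le_add_iff_right] at h
      simp only [PySem.Chars.count.go, List.isPrefixOf]
      by_cases hx : x = c
      · subst hx
        rw [if_pos (by simp)]
        simp only [List.length_cons, List.drop_succ_cons, List.drop_zero,
          List.length_nil]
        rw [ih f (acc + 1) h]
        simp
        omega
      · rw [if_neg (by simp only [Bool.and_eq_true, beq_iff_eq, not_and]; exact fun h' => absurd h'.symm hx)]
        rw [ih f acc h, List.count_cons_of_ne hx]

theorem pvCharsCountSingle (c : Char) (l : List Char) :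
    PySem.Chars.count l [c] = l.count c := by
  simp [PySem.Chars.count, pvCountGoSingle c l l.length 0 le_rfl]

-- A's counting loop computes List.count
theorem pvCountAes (orig : String) : countAes orig = (orig.toList.count 'a' : Int) := by
  unfold countAes
  rw [PySem.List.foldl_beq_add_one]
  simp

-- the loop invariant: from state (orig.drop k, k, flag) the loop returns the closed form
theorem pvLoopClosed (origL : List Char) (ha : 1 ≤ origL.count 'a') :
    ∀ (m k : Nat) (flag : Bool), k + m = origL.length →
      loveLoop origL (origL.count 'a' : Int) (origL.drop k) k flag =
        if (m : Int) ≤ 2 * (origL.count 'a' : Int) - 2 then (if flag then (m : Int) + 1 else (m : Int))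
        else 2 * (origL.count 'a' : Int) - 1 := by
  intro m
  induction m with
  | zero =>
    intro k flag hk
    rw [loveLoop]
    have hdrop : origL.drop k = [] := List.drop_eq_nil_of_le (by omega)
    rw [hdrop]
    have hc1 : (1 : Int) ≤ (origL.count 'a' : Int) := by exact_mod_cast ha
    rw [if_neg (by simp only [List.length_nil]; omega)]
    simp only [List.length_nil, Nat.cast_zero]
    rw [if_pos (show (0 : Int) ≤ 2 * (origL.count 'a' : Int) - 2 by omega)]
  | succ m ih =>
    intro k flag hk
    have hklt : k < origL.length := by omega
    have hlen : (origL.drop k).length = m + 1 := by rw [List.length_drop]; omega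
    rw [loveLoop]
    by_cases hc : (origL.count 'a' : Int) ≤ ((((origL.drop k).length + 1) / 2 : Nat) : Int)
    · rw [if_pos hc]
      rw [hlen] at hc
      have hcc : origL.count 'a' ≤ (m + 1 + 1) / 2 := by exact_mod_cast hc
      have hget : PySem.List.pyGet? origL (k : Int) = some origL[k] := by
        rw [PySem.List.pyGet?_natCast]
        exact List.getElem?_eq_getElem hklt
      have hcons : origL.drop k = origL[k] :: origL.drop (k + 1) :=
        List.drop_eq_getElem_cons hklt
      rw [hget]
      rw [hcons]
      simp only []
      split
      · rename_i h2
        rw [PySem.List.remove?_cons_self] at h2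
        cases h2
      · rename_i s' h2
        rw [PySem.List.remove?_cons_self] at h2
        cases h2
        rw [ih (k + 1) true (show k + 1 + m = origL.length by omega)]
        -- hcc means 2c ≤ m+2, so m+1 > 2c-2 and both branches of the IH value equal 2c-1
        simp only [reduceIte]
        split_ifs <;> omega
    · rw [if_neg hc]
      rw [hlen] at hc
      have hcc : (m + 1 + 1) / 2 < origL.count 'a' :=
        Nat.lt_of_not_le (fun hle => hc (by exact_mod_cast hle))
      rw [hlen]
      split_ifs <;> omega

-- ===== VERDICT (by name: the statement is the Claim_ definition above) =====
theorem love_A_spec : Claim_equal_love_A := by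
  intro orig _ hpre
  unfold Spec_love_A love_A love_A_alt
  have ha : 1 ≤ orig.toList.count 'a' := List.count_pos_iff.2 hpre
  rw [pvCountAes]
  have h0 : orig.toList.drop 0 = orig.toList := List.drop_zero
  have := pvLoopClosed orig.toList ha orig.toList.length 0 false (Nat.zero_add _)
  rw [h0] at this
  rw [this]
  clear this
  simp [pvCharsCountSingle]
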